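-- pv_equiv track=rewrite | github.com/RauPro/Competitive-Programming | Codeforces/Codeforces Round 937 (Div 4)/D.py | is_product_of_binary
-- ===== SOURCE A (Python) =====
-- def is_product_of_binary(n):
--     binary_numbers = [11, 101, 10, 111, 1101, 1011, 1001, 1110]
--     memo = {}
--     def dfs(target):
--         if target == 1:
--             return True
--         if target < 1 or target in memo:
--             return False
--         for number in binary_numbers:
--             if target % number == 0:
--                 if dfs(target // number):
--                     memo[target] = True
--                     return True
--         memo[target] = False
--         return False
--     return dfs(n)
-- ===== SOURCE B (Python) =====
-- def is_product_of_binary(n):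
--     binary_numbers = [11, 101, 10, 111, 1101, 1011, 1001, 1110]
--     stack = [n]
--     while stack:
--         t = stack.pop()
--         if t == 1:
--             return True
--         if t < 1:
--             continue
--         for f in binary_numbers:
--             if t % f == 0:
--                 stack.append(t // f)
--     return False
-- ===== Notes on version B (the rewrite author's own statement) =====
-- stated objective: alternative
-- what changed: Replaced the recursive memoized DFS (inner dfs closure plus a memo dict of failed targets) with an iterative worklist search: an explicit stack of pending targets, no recursion and no memo dictionary.
import Mathlib
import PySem

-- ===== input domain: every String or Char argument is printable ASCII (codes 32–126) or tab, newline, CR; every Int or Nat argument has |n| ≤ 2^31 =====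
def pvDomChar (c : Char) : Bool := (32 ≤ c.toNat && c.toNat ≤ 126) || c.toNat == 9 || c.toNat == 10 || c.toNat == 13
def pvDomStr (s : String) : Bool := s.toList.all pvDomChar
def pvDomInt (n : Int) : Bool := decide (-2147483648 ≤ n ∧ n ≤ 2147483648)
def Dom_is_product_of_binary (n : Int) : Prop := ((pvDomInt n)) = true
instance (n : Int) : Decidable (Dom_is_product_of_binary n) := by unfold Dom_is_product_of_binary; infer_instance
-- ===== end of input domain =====

-- B replaces the recursive memoized DFS with an iterative explicit-stack worklist search (no recursion, no memo dict); alternative decomposition, same results.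


-- ===== PORT A =====
-- the fixed factor list 'binary_numbers'
def pvFactors : List Int := [11, 101, 10, 111, 1101, 1011, 1001, 1110]

-- A's recursion strictly decreases a positive target (each factor ≥ 10), so the
-- fuel n.toNat + 1 supplied below is never exhausted: the fuel is only a
-- totality guard, the computation is Python A's step for step.
mutual
  -- the 'for number in binary_numbers' loop inside dfs
  def pvLoopA (fuel : Nat) (target : Int) (memo : PySem.Dict Int Bool) :
      List Int → Bool × PySem.Dict Int Bool
    | [] => (false, memo)
    | f :: fs =>
      if PySem.Int.mod target f == 0 then
        let r := pvDfsA fuel (PySem.Int.floordiv target f) memo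
        if r.1 then (true, r.2) else pvLoopA fuel target r.2 fs
      else pvLoopA fuel target memo fs
  termination_by fs => (fuel, fs.length + 1)
  -- the inner 'def dfs(target)' (memo threaded through explicitly)
  def pvDfsA (fuel : Nat) (target : Int) (memo : PySem.Dict Int Bool) :
      Bool × PySem.Dict Int Bool :=
    match fuel with
    | 0 => (false, memo)   -- unreachable totality guard
    | fuel + 1 =>
      if target == 1 then (true, memo)
      else if target < 1 || (memo.get? target).isSome then (false, memo)
      else
        let r := pvLoopA fuel target memo pvFactors
        if r.1 then (true, r.2.insert target true)
        else (false, r.2.insert target false)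
  termination_by (fuel, 0)
end

def is_product_of_binary (n : Int) : Bool :=
  (pvDfsA (n.toNat + 1) n PySem.Dict.empty).1

-- ===== PORT B =====
-- termination measure helper for B's while loop, cited in the decreasing proof
def pvMeasure (stack : List Int) : Nat := (stack.map (fun s => 9 ^ s.toNat)).sum

theorem pvChild_le (t f : Int) (ht : 2 ≤ t) (hf : 2 ≤ f) :
    (PySem.Int.floordiv t f).toNat ≤ t.toNat - 1 := by
  rw [PySem.Int.floordiv_eq_ediv_of_pos (by omega)]
  have h1 : t / f < t := Int.ediv_lt_of_lt_mul (by omega) (by nlinarith)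
  have h2 : 0 ≤ t / f := Int.ediv_nonneg (by omega) (by omega)
  omega

theorem pvMeasure_foldl (t : Int) (M : Nat) :
    ∀ (fs rest : List Int), (∀ f ∈ fs, 9 ^ (PySem.Int.floordiv t f).toNat ≤ M) →
    pvMeasure (fs.foldl
        (fun st f => if PySem.Int.mod t f == 0 then PySem.Int.floordiv t f :: st else st) rest)
      ≤ pvMeasure rest + fs.length * M := by
  intro fs
  induction fs with
  | nil => intro rest _; simp [pvMeasure]
  | cons f fs ih =>
    intro rest hfs
    simp only [List.foldl_cons, List.length_cons]
    have e : (fs.length + 1) * M = fs.length * M + M := by ring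
    rw [e]
    by_cases h : PySem.Int.mod t f == 0
    · simp only [h, if_true]
      have h1 := ih (PySem.Int.floordiv t f :: rest) (fun g hg => hfs g (by simp [hg]))
      have h2 : 9 ^ (PySem.Int.floordiv t f).toNat ≤ M := hfs f (by simp)
      simp only [pvMeasure, List.map_cons, List.sum_cons] at h1 ⊢
      omega
    · simp only [h, Bool.false_eq_true, if_false]
      have h1 := ih rest (fun g hg => hfs g (by simp [hg]))
      omega

theorem pvFactors_ge : ∀ f ∈ pvFactors, 2 ≤ f := by decide

-- the 'for f in binary_numbers' push loop of B
def pvPush (t : Int) (rest : List Int) : List Int :=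
  pvFactors.foldl
    (fun st f => if PySem.Int.mod t f == 0 then PySem.Int.floordiv t f :: st else st) rest

-- B's 'while stack' loop (stack head = top of Python's stack)
def pvLoopB (stack : List Int) : Bool :=
  match stack with
  | [] => false
  | t :: rest =>
    if _ht1 : t == 1 then true
    else if _hlt : t < 1 then pvLoopB rest
    else pvLoopB (pvPush t rest)
termination_by pvMeasure stack
decreasing_by
  · simp only [pvMeasure, List.map_cons, List.sum_cons]
    have : 0 < 9 ^ t.toNat := Nat.pow_pos (by omega)
    omega
  · have ht2 : 2 ≤ t := by
      simp only [beq_iff_eq] at _ht1; omega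
    have hM : ∀ f ∈ pvFactors, 9 ^ (PySem.Int.floordiv t f).toNat ≤ 9 ^ (t.toNat - 1) := by
      intro f hf
      exact Nat.pow_le_pow_right (by omega) (pvChild_le t f ht2 (pvFactors_ge f hf))
    have h1 := pvMeasure_foldl t (9 ^ (t.toNat - 1)) pvFactors rest hM
    have h3 : pvFactors.length = 8 := by rfl
    rw [h3] at h1
    have h9 : 9 ^ t.toNat = 9 ^ (t.toNat - 1) * 9 := by
      rw [← pow_succ]
      congr 1
      omega
    have hc : 0 < 9 ^ (t.toNat - 1) := Nat.pow_pos (by omega)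
    simp only [pvPush, pvMeasure, List.map_cons, List.sum_cons] at h1 ⊢
    rw [h9]
    omega

def is_product_of_binary_alt (n : Int) : Bool := pvLoopB [n]

-- ===== PRECONDITION & SPEC =====
def Spec_is_product_of_binary (n : Int) (out : Bool) : Prop := out = is_product_of_binary_alt n
instance (n : Int) (out : Bool) : Decidable (Spec_is_product_of_binary n out) := by unfold Spec_is_product_of_binary; infer_instance

-- ===== CLAIM (what is proved, stated in full; the proofs are below) =====
def Claim_equal_is_product_of_binary : Prop := ∀ (n : Int), Dom_is_product_of_binary n → Spec_is_product_of_binary n (is_product_of_binary n)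

-- ===== LEMMAS AND PROOFS =====

-- the common specification: t is a product of elements of pvFactors
inductive pvGood : Int → Prop
  | one : pvGood 1
  | step (t f : Int) : f ∈ pvFactors → PySem.Int.mod t f = 0 →
      pvGood (PySem.Int.floordiv t f) → pvGood t

theorem pvGood_pos : ∀ t, pvGood t → 1 ≤ t := by
  intro t h
  induction h with
  | one => omega
  | step t f hf hmod _ ih =>
    have hf2 : 2 ≤ f := pvFactors_ge f hf
    have := PySem.Int.floordiv_mul_add_mod t f
    nlinarith

theorem pvGood_inv (t : Int) (ht : t ≠ 1) (h : pvGood t) :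
    ∃ f ∈ pvFactors, PySem.Int.mod t f = 0 ∧ pvGood (PySem.Int.floordiv t f) := by
  cases h with
  | one => exact absurd rfl ht
  | step t f hf hmod hg => exact ⟨f, hf, hmod, hg⟩

-- ---- A-side: the memoized DFS decides pvGood ----
def pvInv (memo : PySem.Dict Int Bool) : Prop :=
  ∀ k, (memo.get? k).isSome → ¬ pvGood k

theorem pvChild_fuel (t f : Int) (fuel : Nat) (ht : 2 ≤ t) (hf : 2 ≤ f)
    (hfuel : t.toNat ≤ fuel) : (PySem.Int.floordiv t f).toNat < fuel := by
  have := pvChild_le t f ht hf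
  omega

theorem pvLoopA_ok (fuel : Nat)
    (ihd : ∀ t memo, t.toNat < fuel → pvInv memo →
      (((pvDfsA fuel t memo).1 = true) ↔ pvGood t) ∧
      ((pvDfsA fuel t memo).1 = false → pvInv (pvDfsA fuel t memo).2)) :
    ∀ (fs : List Int) (t : Int) (memo : PySem.Dict Int Bool),
      (∀ f ∈ fs, 2 ≤ f) → 2 ≤ t → t.toNat ≤ fuel → pvInv memo →
      (((pvLoopA fuel t memo fs).1 = true) ↔
        ∃ f ∈ fs, PySem.Int.mod t f = 0 ∧ pvGood (PySem.Int.floordiv t f)) ∧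
      ((pvLoopA fuel t memo fs).1 = false → pvInv (pvLoopA fuel t memo fs).2) := by
  intro fs
  induction fs with
  | nil =>
    intro t memo _ _ _ hinv
    simp [pvLoopA, hinv]
  | cons f fs ih =>
    intro t memo hfs ht hfuel hinv
    have hf2 : 2 ≤ f := hfs f (by simp)
    have hchild : (PySem.Int.floordiv t f).toNat < fuel := pvChild_fuel t f fuel ht hf2 hfuel
    by_cases hmod : PySem.Int.mod t f = 0
    · have hd := ihd (PySem.Int.floordiv t f) memo hchild hinv
      rw [pvLoopA]
      simp only [hmod, beq_self_eq_true, if_true]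
      cases hr : (pvDfsA fuel (PySem.Int.floordiv t f) memo).1 with
      | true =>
        simp only [if_true]
        refine ⟨⟨fun _ => ⟨f, by simp, hmod, hd.1.mp hr⟩, fun _ => trivial⟩, by simp⟩
      | false =>
        simp only [Bool.false_eq_true, if_false]
        have hinv' := hd.2 hr
        have hnot : ¬ pvGood (PySem.Int.floordiv t f) := fun hg => by
          have := hd.1.mpr hg; simp [hr] at this
        have hrec := ih t (pvDfsA fuel (PySem.Int.floordiv t f) memo).2
          (fun g hg => hfs g (by simp [hg])) ht hfuel hinv'
        refine ⟨?_, hrec.2⟩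
        rw [hrec.1]
        constructor
        · rintro ⟨g, hg, hm, hgd⟩; exact ⟨g, by simp [hg], hm, hgd⟩
        · rintro ⟨g, hg, hm, hgd⟩
          rcases List.mem_cons.mp hg with hgf | hgfs
          · exact absurd (hgf ▸ hgd) hnot
          · exact ⟨g, hgfs, hm, hgd⟩
    · rw [pvLoopA]
      have hmod' : (PySem.Int.mod t f == 0) = false := by simp [hmod]
      simp only [hmod', Bool.false_eq_true, if_false]
      have hrec := ih t memo (fun g hg => hfs g (by simp [hg])) ht hfuel hinv
      refine ⟨?_, hrec.2⟩
      rw [hrec.1]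
      constructor
      · rintro ⟨g, hg, hm, hgd⟩; exact ⟨g, by simp [hg], hm, hgd⟩
      · rintro ⟨g, hg, hm, hgd⟩
        rcases List.mem_cons.mp hg with hgf | hgfs
        · exact absurd (hgf ▸ hm) hmod
        · exact ⟨g, hgfs, hm, hgd⟩

theorem pvDfsA_ok : ∀ (fuel : Nat) (t : Int) (memo : PySem.Dict Int Bool),
    t.toNat < fuel → pvInv memo →
    (((pvDfsA fuel t memo).1 = true) ↔ pvGood t) ∧
    ((pvDfsA fuel t memo).1 = false → pvInv (pvDfsA fuel t memo).2) := by
  intro fuel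
  induction fuel with
  | zero => intro t memo h; omega
  | succ fuel ihd =>
    intro t memo hfuel hinv
    rw [pvDfsA]
    by_cases ht1 : t = 1
    · simp only [ht1, beq_self_eq_true, if_true]
      exact ⟨by simp [pvGood.one], by simp⟩
    · have ht1' : (t == 1) = false := by simp [ht1]
      simp only [ht1', Bool.false_eq_true, if_false]
      by_cases hlt : t < 1
      · have hc : (decide (t < 1) || (memo.get? t).isSome) = true := by simp [hlt]
        simp only [hc, if_true]
        refine ⟨⟨by simp, fun hg => absurd (pvGood_pos t hg) (by omega)⟩, fun _ => hinv⟩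
      · by_cases hmem : (memo.get? t).isSome
        · have hc : (decide (t < 1) || (memo.get? t).isSome) = true := by simp [hmem]
          simp only [hc, if_true]
          exact ⟨⟨by simp, fun hg => absurd hg (hinv t hmem)⟩, fun _ => hinv⟩
        · have hc : (decide (t < 1) || (memo.get? t).isSome) = false := by
            simp [hlt, hmem]
          simp only [hc, Bool.false_eq_true, if_false]
          have ht2 : 2 ≤ t := by omega
          have hloop := pvLoopA_ok fuel ihd pvFactors t memo pvFactors_ge ht2
            (by omega) hinv
          cases hr : (pvLoopA fuel t memo pvFactors).1 with
          | true =>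
            simp only [if_true]
            rcases hloop.1.mp hr with ⟨f, hf, hm, hg⟩
            exact ⟨⟨fun _ => pvGood.step t f hf hm hg, fun _ => trivial⟩, by simp⟩
          | false =>
            simp only [Bool.false_eq_true, if_false]
            have hinv' := hloop.2 hr
            have hnot : ¬ pvGood t := fun hg => by
              have := hloop.1.mpr (pvGood_inv t ht1 hg)
              simp [hr] at this
            refine ⟨⟨by simp, fun hg => absurd hg hnot⟩, fun _ => ?_⟩
            intro k hk
            by_cases hkt : k = t
            · exact hkt ▸ hnot
            · rw [PySem.Dict.get?_insert_of_ne _ _ hkt] at hk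
              exact hinv' k hk

-- ---- B-side: the worklist loop decides pvGood on the stack ----
theorem pvMem_foldl (t : Int) :
    ∀ (fs rest : List Int) (x : Int),
      (x ∈ fs.foldl
        (fun st f => if PySem.Int.mod t f == 0 then PySem.Int.floordiv t f :: st else st) rest)
      ↔ x ∈ rest ∨ ∃ f ∈ fs, PySem.Int.mod t f = 0 ∧ x = PySem.Int.floordiv t f := by
  intro fs
  induction fs with
  | nil => intro rest x; simp
  | cons f fs ih =>
    intro rest x
    simp only [List.foldl_cons]
    by_cases h : PySem.Int.mod t f = 0
    · simp only [h, beq_self_eq_true, if_true, ih, List.mem_cons]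
      constructor
      · rintro ((hx | hx) | ⟨g, hg, hm, hx⟩)
        · exact Or.inr ⟨f, by simp, h, hx⟩
        · exact Or.inl hx
        · exact Or.inr ⟨g, by simp [hg], hm, hx⟩
      · rintro (hx | ⟨g, hg, hm, hx⟩)
        · exact Or.inl (Or.inr hx)
        · rcases hg with hgf | hgfs
          · exact Or.inl (Or.inl (by rw [hx, hgf]))
          · exact Or.inr ⟨g, hgfs, hm, hx⟩
    · have h' : (PySem.Int.mod t f == 0) = false := by simp [h]
      simp only [h', Bool.false_eq_true, if_false, ih]
      constructor
      · rintro (hx | ⟨g, hg, hm, hx⟩)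
        · exact Or.inl hx
        · exact Or.inr ⟨g, by simp [hg], hm, hx⟩
      · rintro (hx | ⟨g, hg, hm, hx⟩)
        · exact Or.inl hx
        · rcases List.mem_cons.mp hg with hgf | hgfs
          · exact absurd (hgf ▸ hm) h
          · exact Or.inr ⟨g, hgfs, hm, hx⟩

theorem pvLoopB_ok : ∀ stack : List Int,
    (pvLoopB stack = true) ↔ ∃ s ∈ stack, pvGood s := by
  intro stack
  induction stack using pvLoopB.induct with
  | case1 => simp [pvLoopB]
  | case2 t rest ht1 =>
    rw [pvLoopB]
    simp only [ht1, dif_pos]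
    have ht : t = 1 := by simpa using ht1
    exact ⟨fun _ => ⟨1, by simp [ht], pvGood.one⟩, fun _ => trivial⟩
  | case3 t rest ht1 hlt ih =>
    rw [pvLoopB]
    simp only [ht1, Bool.false_eq_true, dif_neg, not_false_iff, hlt, dif_pos, ih]
    have hnot : ¬ pvGood t := fun hg => absurd (pvGood_pos t hg) (by omega)
    constructor
    · rintro ⟨s, hs, hg⟩; exact ⟨s, by simp [hs], hg⟩
    · rintro ⟨s, hs, hg⟩
      rcases List.mem_cons.mp hs with hst | hsr
      · exact absurd (hst ▸ hg) hnot
      · exact ⟨s, hsr, hg⟩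
  | case4 t rest ht1 hlt ih =>
    rw [pvLoopB]
    simp only [ht1, Bool.false_eq_true, dif_neg, not_false_iff, hlt, dif_neg, ih]
    have ht2 : 2 ≤ t := by
      simp only [beq_iff_eq] at ht1
      omega
    have hgt : pvGood t ↔ ∃ f ∈ pvFactors, PySem.Int.mod t f = 0 ∧
        pvGood (PySem.Int.floordiv t f) := by
      constructor
      · exact pvGood_inv t (by omega)
      · rintro ⟨f, hf, hm, hg⟩; exact pvGood.step t f hf hm hg
    constructor
    · rintro ⟨s, hs, hg⟩
      rcases (pvMem_foldl t pvFactors rest s).mp hs with hsr | ⟨f, hf, hm, hx⟩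
      · exact ⟨s, by simp [hsr], hg⟩
      · exact ⟨t, by simp, hgt.mpr ⟨f, hf, hm, hx ▸ hg⟩⟩
    · rintro ⟨s, hs, hg⟩
      rcases List.mem_cons.mp hs with hst | hsr
      · rcases hgt.mp (hst ▸ hg) with ⟨f, hf, hm, hgc⟩
        exact ⟨PySem.Int.floordiv t f,
          (pvMem_foldl t pvFactors rest _).mpr (Or.inr ⟨f, hf, hm, rfl⟩), hgc⟩
      · exact ⟨s, (pvMem_foldl t pvFactors rest s).mpr (Or.inl hsr), hg⟩

theorem pvInv_empty : pvInv PySem.Dict.empty := by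
  intro k hk
  simp [PySem.Dict.get?, PySem.Dict.empty] at hk

-- ===== VERDICT (by name: the statement is the Claim_ definition above) =====
theorem is_product_of_binary_spec : Claim_equal_is_product_of_binary := by
  intro n _
  unfold Spec_is_product_of_binary
  have hA := (pvDfsA_ok (n.toNat + 1) n PySem.Dict.empty (by omega) pvInv_empty).1
  have hB : (is_product_of_binary_alt n = true) ↔ pvGood n := by
    rw [is_product_of_binary_alt, pvLoopB_ok]
    simp
  unfold is_product_of_binary
  cases hr : (pvDfsA (n.toNat + 1) n PySem.Dict.empty).1 with
  | true => exact (hB.mpr (hA.mp hr)).symm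
  | false =>
    cases hb : is_product_of_binary_alt n with
    | true => exact absurd (hA.mpr (hB.mp hb)) (by simp [hr])
    | false => rfl
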